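-- pv_equiv track=rewrite | github.com/kiryong-lee/Algorithm | programmers/42579.py | solution
-- ===== SOURCE A (Python) =====
-- def solution(genres, plays):
--
--     order = dict()
--     for g, p in zip(genres, plays):
--         if g in order:
--             order[g] += p
--         else:
--             order[g] = p
--
--     answer = []
--     while len(order) != 0:
--         genre = max(order, key=order.get)
--         f, s = -1, -1
--         for i, g in enumerate(genres):
--             if genre == g:
--                 if f == -1:
--                     f = i
--                 elif plays[f] >= plays[i]:
--                     if s == -1 or plays[s] < plays[i]:
--                         s = i
--                 elif plays[f] < plays[i]:
--                     s = f
--                     f = i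
--         answer.append(f)
--         if s != -1:
--             answer.append(s)
--
--         del(order[genre])
--
--     return answer
-- ===== SOURCE B (Python) =====
-- def solution(genres, plays):
--     # group song indices by genre (dict keeps first-appearance order of genres)
--     groups = {}
--     for i, g in enumerate(genres):
--         groups.setdefault(g, []).append(i)
--     # genres ordered by total plays, descending; ties keep first-appearance order (stable sort)
--     ranked = sorted(groups, key=lambda g: -sum(plays[i] for i in groups[g]))
--     # within a genre: top-2 indices by plays, descending; ties keep lower index (stable sort)
--     answer = []
--     for g in ranked:
--         answer.extend(sorted(groups[g], key=lambda i: -plays[i])[:2])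
--     return answer
-- ===== Notes on version B (the rewrite author's own statement) =====
-- stated objective: faster
-- what changed: A rescans the whole genre list and recomputes a max over the remaining dict once per genre (selection-style); B groups indices by genre in one pass, sorts the genres once by descending total plays and each group once by descending plays, taking the top two per group.
-- outside the precondition, e.g. on solution(['a'], []): A returns [], B raises IndexError; on solution(['a', 'b'], [5]): A returns [0], B raises IndexError
import Mathlib
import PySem

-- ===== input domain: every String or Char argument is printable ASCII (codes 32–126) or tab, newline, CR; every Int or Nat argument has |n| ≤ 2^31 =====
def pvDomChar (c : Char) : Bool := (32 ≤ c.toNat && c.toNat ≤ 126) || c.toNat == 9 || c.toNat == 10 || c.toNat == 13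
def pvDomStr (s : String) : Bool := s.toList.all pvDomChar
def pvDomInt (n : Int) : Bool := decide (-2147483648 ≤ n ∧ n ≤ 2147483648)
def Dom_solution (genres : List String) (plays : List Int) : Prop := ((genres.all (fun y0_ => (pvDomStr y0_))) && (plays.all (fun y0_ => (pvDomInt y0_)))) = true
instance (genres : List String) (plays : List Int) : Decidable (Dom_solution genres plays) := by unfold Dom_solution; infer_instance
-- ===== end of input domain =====

-- B groups song indices by genre once and replaces A's per-genre rescans and repeated dict maxima
-- by two stable sorts (genres by descending total plays, each group by descending plays, top two kept).

-- ===== PORT A =====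

-- the body of A's inner `if genre == g:` block (state fs = (f, s), current index i)
def aCore (plays : List Int) (fs : Int × Int) (i : Int) : Int × Int :=
  if fs.1 = -1 then (i, fs.2)
  else if PySem.List.pyGetD plays fs.1 0 ≥ PySem.List.pyGetD plays i 0 then
    (if fs.2 = -1 ∨ PySem.List.pyGetD plays fs.2 0 < PySem.List.pyGetD plays i 0 then (fs.1, i) else fs)
  else if PySem.List.pyGetD plays fs.1 0 < PySem.List.pyGetD plays i 0 then (i, fs.1)
  else fs

def aStep (genre : String) (plays : List Int) (fs : Int × Int) (p : Int × String) : Int × Int :=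
  if genre == p.2 then aCore plays fs p.1 else fs

-- A's `for i, g in enumerate(genres)` scan for one genre
def aScan (genres : List String) (plays : List Int) (genre : String) : Int × Int :=
  (PySem.List.enumerate genres).foldl (aStep genre plays) (-1, -1)

-- A's first loop: order[g] += p / order[g] = p over zip(genres, plays)
def aBuild (genres : List String) (plays : List Int) : PySem.Dict String Int :=
  (genres.zip plays).foldl
    (fun d gp => if d.contains gp.1 then d.insert gp.1 (d.getD gp.1 0 + gp.2) else d.insert gp.1 gp.2)
    PySem.Dict.empty

-- answer.append(f); if s != -1: answer.append(s)
def aEmit (fs : Int × Int) : List Int := fs.1 :: (if fs.2 ≠ -1 then [fs.2] else [])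

-- termination fact for A's `while len(order) != 0` loop (cited by aLoop's decreasing_by)
theorem dict_size_erase_lt {ν : Type} (d : PySem.Dict String ν) (m : String)
    (h : m ∈ d.keys) : (d.erase m).size < d.size := by
  obtain ⟨p, hp, hpm⟩ := List.mem_map.1 h
  simp only [PySem.Dict.size, PySem.Dict.erase]
  exact List.length_filter_lt_length_iff_exists.2 ⟨p, hp, by simp [hpm]⟩

-- A's while loop: pick the max-total genre, scan it, delete it
def aLoop (genres : List String) (plays : List Int) (d : PySem.Dict String Int) : List Int :=
  match hm : PySem.List.max? d.keys (fun g => d.getD g 0) with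
  | none => []
  | some genre =>
      aEmit (aScan genres plays genre) ++ aLoop genres plays (d.erase genre)
termination_by d.size
decreasing_by exact dict_size_erase_lt d genre (PySem.List.max?_mem hm)

def solution (genres : List String) (plays : List Int) : List Int :=
  aLoop genres plays (aBuild genres plays)

-- ===== PORT B =====

-- groups.setdefault(g, []).append(i) over enumerate(genres)
def bGroups (genres : List String) : PySem.Dict String (List Int) :=
  (PySem.List.enumerate genres).foldl (fun d p => d.modify p.2 [] (· ++ [p.1])) PySem.Dict.empty

-- sum(plays[i] for i in groups[g])
def bTotal (plays : List Int) (groups : PySem.Dict String (List Int)) (g : String) : Int :=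
  (((groups.getD g []).map (fun i => PySem.List.pyGetD plays i 0))).sum

def solution_alt (genres : List String) (plays : List Int) : List Int :=
  let groups := bGroups genres
  let ranked := PySem.List.sorted groups.keys (fun g => -(bTotal plays groups g)) false
  ranked.flatMap (fun g =>
    (PySem.List.sorted (groups.getD g []) (fun i => -(PySem.List.pyGetD plays i 0)) false).take 2)

-- ===== PRECONDITION & SPEC =====
-- Pre_ excludes inputs where plays is shorter than genres: there A's inner scan indexes plays[i]
-- past the end (IndexError) except in degenerate truncation cases where its value is accidental,
-- and B itself raises IndexError on all of them.
def Pre_solution (genres : List String) (plays : List Int) : Prop :=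
  genres.length ≤ plays.length
instance (genres : List String) (plays : List Int) : Decidable (Pre_solution genres plays) := by
  unfold Pre_solution; infer_instance

def pvWitness_solution : List String × List Int := (["a", "b", "a"], [5, 6, 7])

def Spec_solution (genres : List String) (plays : List Int) (out : List Int) : Prop :=
  out = solution_alt genres plays
instance (genres : List String) (plays : List Int) (out : List Int) :
    Decidable (Spec_solution genres plays out) := by unfold Spec_solution; infer_instance

-- ===== CLAIM (what is proved, stated in full; the proofs are below) =====
def Claim_equal_solution : Prop := ∀ (genres : List String) (plays : List Int),
  Dom_solution genres plays → Pre_solution genres plays →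
  Spec_solution genres plays (solution genres plays)

-- ===== LEMMAS AND PROOFS =====

-- abbreviation used only by the proofs: one play count
def pw (plays : List Int) (i : Int) : Int := PySem.List.pyGetD plays i 0

-- ---- Dict.erase facts ----
theorem find?_filter_ne {ν : Type} (items : List (String × ν)) (g m : String) (h : g ≠ m) :
    List.find? (fun p => p.1 == g) (items.filter (fun p => !(p.1 == m))) =
    List.find? (fun p => p.1 == g) items := by
  have hmg : (m == g) = false := by simp; exact fun hc => h hc.symm
  induction items with
  | nil => rfl
  | cons p rest ih =>
      by_cases hmm : p.1 = m
      · simp [hmm, List.find?_cons, hmg, ih]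
      · by_cases hg : p.1 = g
        · simp [List.filter_cons, hmm, hg, h, List.find?_cons]
        · simp [List.filter_cons, hmm, hg, h, List.find?_cons, ih]

theorem getD_erase_of_ne {ν : Type} (d : PySem.Dict String ν) (dflt : ν) (g m : String)
    (h : g ≠ m) : (d.erase m).getD g dflt = d.getD g dflt := by
  simp [PySem.Dict.getD, PySem.Dict.get?, PySem.Dict.erase, find?_filter_ne _ _ _ h]

theorem keys_erase {ν : Type} (d : PySem.Dict String ν) (m : String) (h : d.keys.Nodup) :
    (d.erase m).keys = d.keys.erase m := by
  have : (d.erase m).keys = d.keys.filter (fun k => !(k == m)) := by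
    simp [PySem.Dict.keys, PySem.Dict.erase, List.filter_map, Function.comp_def]
  rw [this, List.Nodup.erase_eq_filter h]
  rfl

-- ---- insertBy facts ----
theorem insertBy_cons_of_before {α : Type} (bf : α → α → Bool) (x y : α) (ys : List α)
    (h : bf x y = true) : PySem.List.insertBy bf x (y :: ys) = x :: y :: ys := by
  simp [PySem.List.insertBy, h]

theorem insertBy_cons_of_not_before {α : Type} (bf : α → α → Bool) (x y : α) (ys : List α)
    (h : bf x y = false) : PySem.List.insertBy bf x (y :: ys) = y :: PySem.List.insertBy bf x ys := by
  simp [PySem.List.insertBy, h]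

theorem insertBy_head {α : Type} (bf : α → α → Bool) (x : α) (ys : List α)
    (h : ∀ y ∈ ys, bf x y = true) : PySem.List.insertBy bf x ys = x :: ys := by
  cases ys with
  | nil => rfl
  | cons y t => exact insertBy_cons_of_before _ _ _ _ (h y (by simp))

theorem foldl_insertBy_min {α : Type} (k : α → Int) (xs : List α) :
    ∀ (acc : List α) (m : α), (∀ a ∈ acc, k m ≤ k a) → (∀ b ∈ xs, k m ≤ k b) →
    xs.foldl (fun acc x => PySem.List.insertBy (fun a b => decide (k a < k b)) x acc) (m :: acc) =
    m :: xs.foldl (fun acc x => PySem.List.insertBy (fun a b => decide (k a < k b)) x acc) acc := by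
  induction xs with
  | nil => intro acc m _ _; rfl
  | cons b xs ih =>
      intro acc m hacc hxs
      have hb : k m ≤ k b := hxs b (by simp)
      have h1 : PySem.List.insertBy (fun a b => decide (k a < k b)) b (m :: acc) =
          m :: PySem.List.insertBy (fun a b => decide (k a < k b)) b acc :=
        insertBy_cons_of_not_before _ _ _ _ (by simp; omega)
      simp only [List.foldl_cons, h1]
      refine ih _ m ?_ ?_
      · intro a ha
        rcases (PySem.List.mem_insertBy _ b a acc).1 ha with h | h
        · exact h ▸ hb
        · exact hacc a h
      · intro c hc
        exact hxs c (by simp [hc])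

-- selection step: a stable ascending sort puts a first minimum in front
theorem sorted_cons_of_firstmin (k : String → Int) (pre suf : List String) (m : String)
    (hpre : ∀ a ∈ pre, k m < k a) (hsuf : ∀ b ∈ suf, k m ≤ k b) :
    PySem.List.sorted (pre ++ m :: suf) k false = m :: PySem.List.sorted (pre ++ suf) k false := by
  have hiB := PySem.List.sorted_eq_foldl_insertBy (pre ++ m :: suf) k
  have hiP := PySem.List.sorted_eq_foldl_insertBy pre k
  have hiC := PySem.List.sorted_eq_foldl_insertBy (pre ++ suf) k
  set ins := fun (acc : List String) (x : String) =>
    PySem.List.insertBy (fun a b => decide (k a < k b)) x acc with hins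
  set P := pre.foldl ins [] with hP
  have hmemP : ∀ y ∈ P, y ∈ pre := by
    intro y hy
    have : y ∈ PySem.List.sorted pre k false := by rw [hiP]; exact hy
    exact (PySem.List.mem_sorted pre k false y).1 this
  have h1 : ins P m = m :: P := by
    rw [hins]
    exact insertBy_head _ _ _ (fun y hy => by simp [hpre y (hmemP y hy)])
  calc PySem.List.sorted (pre ++ m :: suf) k false
      = (pre ++ m :: suf).foldl ins [] := hiB
    _ = suf.foldl ins (ins P m) := by rw [List.foldl_append, List.foldl_cons]
    _ = suf.foldl ins (m :: P) := by rw [h1]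
    _ = m :: suf.foldl ins P := by
          exact foldl_insertBy_min k suf P m
            (fun a ha => le_of_lt (hpre a (hmemP a ha))) hsuf
    _ = m :: (pre ++ suf).foldl ins [] := by rw [List.foldl_append]
    _ = m :: PySem.List.sorted (pre ++ suf) k false := by rw [hiC]

-- first-max decomposition of PySem.List.max?
theorem max?_cons_cons (t : String → Int) (a b : String) (l : List String) :
    PySem.List.max? (a :: b :: l) t =
    PySem.List.max? ((if t a < t b then b else a) :: l) t := by
  by_cases h : t a < t b <;> simp [PySem.List.max?, List.foldl_cons, h]

theorem max?_decomp (t : String → Int) (xs : List String) (m : String)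
    (h : PySem.List.max? xs t = some m) :
    ∃ pre suf, xs = pre ++ m :: suf ∧ (∀ a ∈ pre, t a < t m) ∧ (∀ b ∈ suf, t b ≤ t m) := by
  have go : ∀ (l : List String) (m0 : String), ∃ mr,
      PySem.List.max? (m0 :: l) t = some mr ∧
      ((mr = m0 ∧ ∀ b ∈ l, t b ≤ t m0) ∨
       (t m0 < t mr ∧ ∃ pre suf, l = pre ++ mr :: suf ∧
         (∀ a ∈ pre, t a < t mr) ∧ (∀ b ∈ suf, t b ≤ t mr))) := by
    intro l
    induction l with
    | nil => intro m0; exact ⟨m0, rfl, Or.inl ⟨rfl, by simp⟩⟩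
    | cons b rest ih =>
        intro m0
        by_cases hb : t m0 < t b
        · obtain ⟨mr, hfold, hcase⟩ := ih b
          refine ⟨mr, by rw [max?_cons_cons, if_pos hb]; exact hfold, Or.inr ?_⟩
          rcases hcase with ⟨rfl, hall⟩ | ⟨hlt, pre, suf, rfl, hpre, hsuf⟩
          · exact ⟨hb, [], rest, rfl, by simp, hall⟩
          · exact ⟨lt_trans hb hlt, b :: pre, suf, rfl,
              by intro a ha; rcases List.mem_cons.1 ha with rfl | ha
                 · exact hlt
                 · exact hpre a ha, hsuf⟩
        · obtain ⟨mr, hfold, hcase⟩ := ih m0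
          refine ⟨mr, by rw [max?_cons_cons, if_neg hb]; exact hfold, ?_⟩
          rcases hcase with ⟨rfl, hall⟩ | ⟨hlt, pre, suf, rfl, hpre, hsuf⟩
          · refine Or.inl ⟨rfl, ?_⟩
            intro c hc
            rcases List.mem_cons.1 hc with rfl | hc
            · omega
            · exact hall c hc
          · refine Or.inr ⟨hlt, b :: pre, suf, rfl, ?_, hsuf⟩
            intro a ha
            rcases List.mem_cons.1 ha with rfl | ha
            · omega
            · exact hpre a ha
  cases xs with
  | nil => simp [PySem.List.max?] at h
  | cons x rest =>
      obtain ⟨mr, hfold, hcase⟩ := go rest x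
      have hmr : mr = m := Option.some_inj.1 (hfold.symm.trans h)
      subst hmr
      rcases hcase with ⟨rfl, hall⟩ | ⟨hlt, pre, suf, rfl, hpre, hsuf⟩
      · exact ⟨[], rest, rfl, by simp, hall⟩
      · exact ⟨x :: pre, suf, rfl,
          by intro a ha; rcases List.mem_cons.1 ha with rfl | ha
             · exact hlt
             · exact hpre a ha, hsuf⟩

-- ---- sorted only depends on key values on the list ----
theorem insertBy_congr {α : Type} (k1 k2 : α → Int) (x : α) (acc : List α)
    (hx : k1 x = k2 x) (hacc : ∀ a ∈ acc, k1 a = k2 a) :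
    PySem.List.insertBy (fun a b => decide (k1 a < k1 b)) x acc =
    PySem.List.insertBy (fun a b => decide (k2 a < k2 b)) x acc := by
  induction acc with
  | nil => rfl
  | cons y t ih =>
      have hy : k1 y = k2 y := hacc y (by simp)
      by_cases h : k1 x < k1 y
      · rw [insertBy_cons_of_before _ _ _ _ (by simp [h]),
            insertBy_cons_of_before _ _ _ _ (by simp [← hx, ← hy, h])]
      · rw [insertBy_cons_of_not_before _ _ _ _ (by simp [h]),
            insertBy_cons_of_not_before _ _ _ _ (by simp [← hx, ← hy, h]),
            ih (by intro a ha; exact hacc a (by simp [ha]))]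

theorem sorted_congr {α : Type} (k1 k2 : α → Int) (xs : List α)
    (h : ∀ x ∈ xs, k1 x = k2 x) :
    PySem.List.sorted xs k1 false = PySem.List.sorted xs k2 false := by
  rw [PySem.List.sorted_eq_foldl_insertBy, PySem.List.sorted_eq_foldl_insertBy]
  have go : ∀ (l : List α) (acc : List α), (∀ x ∈ l, k1 x = k2 x) → (∀ a ∈ acc, k1 a = k2 a) →
      l.foldl (fun acc x => PySem.List.insertBy (fun a b => decide (k1 a < k1 b)) x acc) acc =
      l.foldl (fun acc x => PySem.List.insertBy (fun a b => decide (k2 a < k2 b)) x acc) acc := by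
    intro l
    induction l with
    | nil => intro acc _ _; rfl
    | cons x rest ih =>
        intro acc hl hacc
        have hx : k1 x = k2 x := hl x (by simp)
        simp only [List.foldl_cons]
        rw [insertBy_congr k1 k2 x acc hx hacc]
        refine ih _ (fun y hy => hl y (by simp [hy])) ?_
        intro a ha
        rcases (PySem.List.mem_insertBy _ x a acc).1 ha with rfl | ha
        · exact hx
        · exact hacc a ha
  exact go xs [] h (by simp)

-- ---- the (f, s) scan computes the first two of the descending stable sort ----
theorem top2_inv (plays : List Int) (l : List Int) (h0 : ∀ i ∈ l, 0 ≤ i) (hne : l ≠ []) :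
    ∃ a t, PySem.List.sorted l (fun i => -(PySem.List.pyGetD plays i 0)) false = a :: t ∧
      l.foldl (aCore plays) (-1, -1) = (a, t.headD (-1)) := by
  induction l using List.reverseRecOn with
  | nil => exact absurd rfl hne
  | append_singleton l i ih =>
      have hi : (0 : Int) ≤ i := h0 i (by simp)
      by_cases hl : l = []
      · subst hl
        refine ⟨i, [], ?_, ?_⟩
        · rw [PySem.List.sorted_eq_foldl_insertBy]
          rfl
        · simp [aCore]
      · obtain ⟨a, t, hs, hf⟩ := ih (fun j hj => h0 j (by simp [hj])) hl
        have hmem : ∀ y ∈ a :: t, y ∈ l := by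
          intro y hy
          have : y ∈ PySem.List.sorted l (fun i => -(PySem.List.pyGetD plays i 0)) false :=
            hs ▸ hy
          exact (PySem.List.mem_sorted _ _ _ _).1 this
        have ha : (0 : Int) ≤ a := h0 a (by simp [hmem a (by simp)])
        have hins : PySem.List.sorted (l ++ [i]) (fun i => -(PySem.List.pyGetD plays i 0)) false =
            PySem.List.insertBy
              (fun x y => decide (-(PySem.List.pyGetD plays x 0) < -(PySem.List.pyGetD plays y 0)))
              i (a :: t) := by
          rw [PySem.List.sorted_eq_foldl_insertBy, List.foldl_append, List.foldl_cons,
              List.foldl_nil, ← PySem.List.sorted_eq_foldl_insertBy, hs]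
        have hfold : (l ++ [i]).foldl (aCore plays) (-1, -1) =
            aCore plays (a, t.headD (-1)) i := by
          rw [List.foldl_append, hf, List.foldl_cons, List.foldl_nil]
        cases t with
        | nil =>
            simp only [List.headD_nil] at hfold
            by_cases hw : PySem.List.pyGetD plays a 0 < PySem.List.pyGetD plays i 0
            · refine ⟨i, [a], ?_, ?_⟩
              · rw [hins, insertBy_cons_of_before _ _ _ _ (by simp; omega)]
              · rw [hfold]
                simp only [List.headD_cons, aCore]
                rw [if_neg (by omega), if_neg (by omega), if_pos hw]
            · refine ⟨a, [i], ?_, ?_⟩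
              · rw [hins, insertBy_cons_of_not_before _ _ _ _ (by simp; omega)]
                trivial
              · rw [hfold]
                simp only [List.headD_cons, aCore]
                rw [if_neg (by omega), if_pos (by omega), if_pos (by simp)]
        | cons b t' =>
            have hb : (0 : Int) ≤ b := h0 b (by simp [hmem b (by simp)])
            simp only [List.headD_cons] at hfold
            by_cases hwa : PySem.List.pyGetD plays a 0 < PySem.List.pyGetD plays i 0
            · refine ⟨i, a :: b :: t', ?_, ?_⟩
              · rw [hins, insertBy_cons_of_before _ _ _ _ (by simp; omega)]
              · rw [hfold]
                simp only [List.headD_cons, aCore]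
                rw [if_neg (by omega), if_neg (by omega), if_pos hwa]
            · by_cases hwb : PySem.List.pyGetD plays b 0 < PySem.List.pyGetD plays i 0
              · refine ⟨a, i :: b :: t', ?_, ?_⟩
                · rw [hins, insertBy_cons_of_not_before _ _ _ _ (by simp; omega),
                      insertBy_cons_of_before _ _ _ _ (by simp; omega)]
                · rw [hfold]
                  simp only [List.headD_cons, aCore]
                  rw [if_neg (by omega), if_pos (by omega), if_pos (Or.inr hwb)]
              · refine ⟨a, b :: PySem.List.insertBy
                    (fun x y => decide (-(PySem.List.pyGetD plays x 0) <
                      -(PySem.List.pyGetD plays y 0))) i t', ?_, ?_⟩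
                · rw [hins, insertBy_cons_of_not_before _ _ _ _ (by simp; omega),
                      insertBy_cons_of_not_before _ _ _ _ (by simp; omega)]
                · rw [hfold]
                  simp only [List.headD_cons, aCore]
                  rw [if_neg (by omega), if_pos (by omega),
                      if_neg (by rw [not_or]; exact ⟨by omega, by omega⟩)]

theorem top2 (plays : List Int) (l : List Int) (h0 : ∀ i ∈ l, 0 ≤ i) (hne : l ≠ []) :
    aEmit (l.foldl (aCore plays) (-1, -1)) =
    (PySem.List.sorted l (fun i => -(PySem.List.pyGetD plays i 0)) false).take 2 := by
  obtain ⟨a, t, hs, hf⟩ := top2_inv plays l h0 hne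
  rw [hf, hs]
  cases t with
  | nil => simp [aEmit]
  | cons b t' =>
      have hb : (0 : Int) ≤ b := by
        refine h0 b ?_
        have : b ∈ PySem.List.sorted l (fun i => -(PySem.List.pyGetD plays i 0)) false := by
          simp [hs]
        exact (PySem.List.mem_sorted _ _ _ _).1 this
      simp [aEmit]
      omega

-- ---- scan over enumerate = fold over the genre's index group ----
theorem groups_getD (genres : List String) (g : String) :
    (bGroups genres).getD g [] =
    ((PySem.List.enumerate genres).filter (fun p => p.2 == g)).map (fun p => p.1) := by
  have h1 : bGroups genres =
      ((PySem.List.enumerate genres).map Prod.swap).foldl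
        (fun d q => d.modify q.1 [] (· ++ [q.2])) PySem.Dict.empty := by
    rw [bGroups, List.foldl_map]
    rfl
  rw [h1, PySem.Dict.getD_foldl_modify_append]
  simp [List.filter_map, List.map_map, Function.comp_def, Prod.swap]

theorem scan_eq (genres : List String) (plays : List Int) (g : String) :
    aScan genres plays g = ((bGroups genres).getD g []).foldl (aCore plays) (-1, -1) := by
  rw [groups_getD, List.foldl_map, List.foldl_filter, aScan]
  refine PySem.List.foldl_congr_mem _ _ _ _ ?_
  intro fs p _
  by_cases h : g = p.2
  · simp [aStep, h]
  · simp [aStep, h, Ne.symm h]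

-- ---- keys ----
theorem groups_keys (genres : List String) : (bGroups genres).keys = PySem.Set.ofList genres := by
  rw [bGroups, PySem.Dict.keys_foldl_modify_key (PySem.List.enumerate genres) (fun p => p.2) []
        (fun _ p => (· ++ [p.1])) PySem.Dict.empty]
  simp [PySem.Dict.keys_empty, PySem.List.map_snd_enumerate, PySem.Set.update_nil_left]

theorem build_eq (genres : List String) (plays : List Int) :
    aBuild genres plays =
    (genres.zip plays).foldl (fun d gp => d.insert gp.1 (d.getD gp.1 0 + gp.2))
      PySem.Dict.empty := by
  rw [aBuild]
  congr 1
  funext d gp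
  by_cases hc : d.contains gp.1 = true
  · simp [hc]
  · rw [if_neg hc, PySem.Dict.getD_of_not_contains d 0 (by simpa using hc)]
    norm_num

theorem build_keys (genres : List String) (plays : List Int) (h : genres.length ≤ plays.length) :
    (aBuild genres plays).keys = PySem.Set.ofList genres := by
  rw [build_eq, PySem.Dict.keys_foldl_insert_key (genres.zip plays) (fun gp => gp.1)
        (fun d gp => d.getD gp.1 0 + gp.2) PySem.Dict.empty]
  simp [PySem.Dict.keys_empty, PySem.Set.update_nil_left, List.map_fst_zip h]

theorem build_nodup (genres : List String) (plays : List Int) : (aBuild genres plays).keys.Nodup := by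
  rw [build_eq]
  exact PySem.Dict.nodup_keys_foldl_insert_key (genres.zip plays) (fun gp => gp.1)
    (fun d gp => d.getD gp.1 0 + gp.2) PySem.Dict.empty PySem.Dict.nodup_keys_empty

-- ---- totals ----
theorem build_getD (genres : List String) (plays : List Int) (g : String) :
    (aBuild genres plays).getD g 0 =
    (((genres.zip plays).filter (fun p => p.1 == g)).map (fun p => p.2)).sum := by
  rw [build_eq]
  have go : ∀ (l : List (String × Int)) (d : PySem.Dict String Int),
      (l.foldl (fun d gp => d.insert gp.1 (d.getD gp.1 0 + gp.2)) d).getD g 0 =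
      d.getD g 0 + ((l.filter (fun p => p.1 == g)).map (fun p => p.2)).sum := by
    intro l
    induction l with
    | nil => intro d; simp
    | cons p rest ih =>
        intro d
        rw [List.foldl_cons, ih]
        by_cases hpg : p.1 = g
        · rw [List.filter_cons_of_pos (by simp [hpg]), List.map_cons, List.sum_cons,
              PySem.Dict.getD_insert]
          simp [hpg]
          ring
        · rw [List.filter_cons_of_neg (by simp [hpg]), PySem.Dict.getD_insert]
          simp [Ne.symm hpg]
  rw [go]
  simp

theorem enum_zip (genres : List String) (plays : List Int) :
    ∀ (s : Nat), s + genres.length ≤ plays.length →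
    (PySem.List.enumerate genres (s : Int)).map (fun p => (p.2, PySem.List.pyGetD plays p.1 0)) =
    genres.zip (plays.drop s) := by
  induction genres with
  | nil => intro s _; simp [PySem.List.enumerate]
  | cons g gs ih =>
      intro s hs
      have hslt : s < plays.length := by simp at hs; omega
      rw [PySem.List.enumerate_cons, List.map_cons]
      have h1 : PySem.List.pyGetD plays (s : Int) 0 = plays[s] := by
        rw [PySem.List.pyGetD_natCast]
        exact List.getD_eq_getElem plays 0 hslt
      have h2 : plays.drop s = plays[s] :: plays.drop (s + 1) :=
        List.drop_eq_getElem_cons hslt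
      rw [h2]
      simp only [List.zip_cons_cons]
      have h3 : ((s : Int) + 1) = ((s + 1 : Nat) : Int) := by push_cast; ring
      rw [h1, h3, ih (s + 1) (by simp at hs ⊢; omega)]

theorem total_eq (genres : List String) (plays : List Int) (h : genres.length ≤ plays.length)
    (g : String) : (aBuild genres plays).getD g 0 = bTotal plays (bGroups genres) g := by
  rw [build_getD, bTotal, groups_getD]
  have hz : genres.zip plays = (PySem.List.enumerate genres).map
      (fun p => (p.2, PySem.List.pyGetD plays p.1 0)) := by
    have := enum_zip genres plays 0 (by simpa using h)
    simp only [Nat.cast_zero, List.drop_zero] at this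
    exact this.symm
  rw [hz, List.filter_map]
  simp [List.map_map, Function.comp_def]

-- ---- group contents ----
theorem idx_nonneg (genres : List String) (g : String) :
    ∀ i ∈ (bGroups genres).getD g [], 0 ≤ i := by
  intro i hi
  rw [groups_getD] at hi
  obtain ⟨p, hp, rfl⟩ := List.mem_map.1 hi
  obtain ⟨k, hk, rfl⟩ := (PySem.List.mem_enumerate_iff _ _ _).1 (List.mem_of_mem_filter hp)
  simp

theorem idx_nonempty (genres : List String) (g : String) (h : g ∈ (bGroups genres).keys) :
    (bGroups genres).getD g [] ≠ [] := by
  rw [groups_keys] at h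
  have hg : g ∈ genres := (PySem.Set.mem_ofList genres g).1 h
  obtain ⟨k, hk, rfl⟩ := List.mem_iff_getElem.1 hg
  rw [groups_getD]
  intro hnil
  have hmem : ((0 : Int) + k, genres[k]) ∈ PySem.List.enumerate genres 0 :=
    (PySem.List.mem_enumerate_iff _ _ _).2 ⟨k, hk, rfl⟩
  have : ((0 : Int) + k, genres[k]) ∈
      (PySem.List.enumerate genres).filter (fun p => p.2 == genres[k]) :=
    List.mem_filter.2 ⟨hmem, by simp⟩
  rw [List.map_eq_nil_iff.1 hnil] at this
  simp at this

-- ---- A's while loop is the descending stable sort of the keys ----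
theorem aLoop_eq (genres : List String) (plays : List Int) :
    ∀ (n : Nat) (d : PySem.Dict String Int), d.size ≤ n → d.keys.Nodup →
    aLoop genres plays d =
    (PySem.List.sorted d.keys (fun g => -(d.getD g 0)) false).flatMap
      (fun g => aEmit (aScan genres plays g)) := by
  intro n
  induction n with
  | zero =>
      intro d hsz hnd
      have hitems : d.items = [] := List.eq_nil_of_length_eq_zero (Nat.le_zero.1 hsz)
      have hkeys : d.keys = [] := by simp [PySem.Dict.keys, hitems]
      rw [aLoop]
      split
      · rw [hkeys]
        rfl
      · next genre hmm =>
          rw [hkeys] at hmm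
          simp [PySem.List.max?] at hmm
  | succ n ih =>
      intro d hsz hnd
      rw [aLoop]
      split
      · next hmm =>
          have hkeys : d.keys = [] := (PySem.List.max?_eq_none_iff _ _).1 hmm
          rw [hkeys]
          rfl
      · next m hmm =>
          obtain ⟨pre, suf, hxs, hpre, hsuf⟩ := max?_decomp _ _ _ hmm
          have hmpre : m ∉ pre := fun hm => absurd (hpre m hm) (by omega)
          have herase : d.keys.erase m = pre ++ suf := by
            rw [hxs, List.erase_append_right _ (by simpa using hmpre), List.erase_cons_head]
          have hsel : PySem.List.sorted d.keys (fun g => -(d.getD g 0)) false =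
              m :: PySem.List.sorted (pre ++ suf) (fun g => -(d.getD g 0)) false := by
            rw [hxs]
            exact sorted_cons_of_firstmin _ _ _ _
              (fun a hha => by have := hpre a hha; omega)
              (fun b hhb => by have := hsuf b hhb; omega)
          have hszlt : (d.erase m).size ≤ n := by
            have := dict_size_erase_lt d m (PySem.List.max?_mem hmm)
            omega
          have hnd' : (d.erase m).keys.Nodup := by
            rw [keys_erase d m hnd]
            exact hnd.erase m
          have hrec := ih (d.erase m) hszlt hnd'
          have hcongr : PySem.List.sorted (d.erase m).keys
                (fun g => -((d.erase m).getD g 0)) false =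
              PySem.List.sorted (pre ++ suf) (fun g => -(d.getD g 0)) false := by
            rw [keys_erase d m hnd, herase]
            refine sorted_congr _ _ _ ?_
            intro g hg
            have hgne : g ≠ m := by
              intro hgm
              subst hgm
              exact (List.Nodup.not_mem_erase hnd) (herase ▸ hg)
            rw [getD_erase_of_ne d 0 g m hgne]
          rw [hrec, hcongr, hsel, List.flatMap_cons]
  

-- ===== VERDICT (by name: the statement is the Claim_ definition above) =====
theorem solution_spec : Claim_equal_solution := by
  intro genres plays _hdom hpre
  have hlen : genres.length ≤ plays.length := hpre
  show solution genres plays = solution_alt genres plays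
  rw [solution,
      aLoop_eq genres plays (aBuild genres plays).size (aBuild genres plays) le_rfl
        (build_nodup genres plays)]
  show _ = (PySem.List.sorted (bGroups genres).keys
      (fun g => -(bTotal plays (bGroups genres) g)) false).flatMap
      (fun g => (PySem.List.sorted ((bGroups genres).getD g [])
        (fun i => -(PySem.List.pyGetD plays i 0)) false).take 2)
  have hks : (aBuild genres plays).keys = (bGroups genres).keys := by
    rw [build_keys _ _ hlen, groups_keys]
  rw [hks,
      sorted_congr (fun g => -((aBuild genres plays).getD g 0))
        (fun g => -(bTotal plays (bGroups genres) g)) (bGroups genres).keys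
        (fun g _ => by simp only []; rw [total_eq genres plays hlen g]),
      List.flatMap_def, List.flatMap_def]
  refine congrArg List.flatten (List.map_congr_left ?_)
  intro g hg
  have hgk : g ∈ (bGroups genres).keys := (PySem.List.mem_sorted _ _ _ _).1 hg
  rw [scan_eq]
  exact top2 plays _ (idx_nonneg genres g) (idx_nonempty genres g hgk)
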